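-- pv_equiv track=rewrite | github.com/AsalKermanpour/Python-Project | EX3/EX3_6.py | face
-- ===== SOURCE A (Python) =====
-- def face(INTLIST):
--     '''
-- (int) -> str
-- '''
--     invertal = max(INTLIST) - min(INTLIST)
--     face = " "
--     for num in INTLIST:
--         if num == invertal:
--             face = ":)"
--         else:
--             face = ":("
--     return face
-- ===== SOURCE B (Python) =====
-- def face(INTLIST):
--     it = iter(INTLIST)
--     mn = mx = last = next(it)
--     for x in it:
--         if x < mn:
--             mn = x
--         if x > mx:
--             mx = x
--         last = x
--     return ":)" if last == mx - mn else ":("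
-- ===== Notes on version B (the rewrite author's own statement) =====
-- stated objective: alternative
-- what changed: A's two library extrema passes plus an overwrite loop are replaced by one single pass carrying a (min, max, last) accumulator, ending with one comparison of the last element against max-min (the loop's final overwrite is the only one that survives).
import Mathlib
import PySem

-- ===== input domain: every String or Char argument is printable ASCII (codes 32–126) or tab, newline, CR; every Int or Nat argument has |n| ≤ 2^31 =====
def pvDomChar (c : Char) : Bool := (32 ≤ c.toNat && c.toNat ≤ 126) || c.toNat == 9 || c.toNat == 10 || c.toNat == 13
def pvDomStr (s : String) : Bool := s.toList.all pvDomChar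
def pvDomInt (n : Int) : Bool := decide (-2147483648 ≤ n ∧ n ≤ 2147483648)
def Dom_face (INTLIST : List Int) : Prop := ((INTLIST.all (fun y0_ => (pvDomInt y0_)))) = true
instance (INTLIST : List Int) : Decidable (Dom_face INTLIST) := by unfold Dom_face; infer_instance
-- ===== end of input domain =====

-- ===== PORT A =====
-- B replaces A's two library extrema passes plus overwrite loop by one pass with a (min, max, last) accumulator.
def face (INTLIST : List Int) : String :=
  -- max()/min() raise ValueError on [] (the `none` branches); excluded by Pre_face
  (PySem.List.max? INTLIST (fun y => y)).casesOn "" (fun mx =>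
    (PySem.List.min? INTLIST (fun y => y)).casesOn "" (fun mn =>
      let invertal := mx - mn
      INTLIST.foldl (fun _f num => if num = invertal then ":)" else ":(") " "))

-- ===== PORT B =====
def face_alt (INTLIST : List Int) : String :=
  match INTLIST with
  | [] => ""   -- next(it) raises on the empty list; excluded by Pre_face
  | first :: rest =>
    let s : Int × Int × Int :=
      rest.foldl (fun acc x =>
        ((if x < acc.1 then x else acc.1),
         (if x > acc.2.1 then x else acc.2.1),
         x)) (first, first, first)
    if s.2.2 = s.2.1 - s.1 then ":)" else ":("

-- ===== PRECONDITION & SPEC =====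
-- Pre_face excludes only the empty list, on which A raises ValueError (and B StopIteration).
def Pre_face (INTLIST : List Int) : Prop := INTLIST ≠ []
instance (INTLIST : List Int) : Decidable (Pre_face INTLIST) := by unfold Pre_face; infer_instance
def pvWitness_face : List Int := ([3, 1, 2])
def Spec_face (INTLIST : List Int) (out : String) : Prop := out = face_alt INTLIST
instance (INTLIST : List Int) (out : String) : Decidable (Spec_face INTLIST out) := by unfold Spec_face; infer_instance

-- ===== CLAIM (what is proved, stated in full; the proofs are below) =====
def Claim_equal_face : Prop := ∀ (INTLIST : List Int), Dom_face INTLIST → Pre_face INTLIST → Spec_face INTLIST (face INTLIST)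

-- ===== LEMMAS AND PROOFS =====
-- B's single-pass triple fold computes (running min, running max, last element).
theorem triple_fold_eq (t : List Int) : ∀ (mn0 mx0 l0 : Int),
    t.foldl (fun (acc : Int × Int × Int) x =>
        ((if x < acc.1 then x else acc.1),
         (if x > acc.2.1 then x else acc.2.1),
         x)) (mn0, mx0, l0)
      = (t.foldl min mn0, t.foldl max mx0, t.getLastD l0) := by
  induction t with
  | nil => intro mn0 mx0 l0; simp
  | cons b t' ih =>
      intro mn0 mx0 l0
      simp only [List.foldl_cons, List.getLastD_cons]
      have h1 : (if b < mn0 then b else mn0) = min mn0 b := by omega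
      have h2 : (if b > mx0 then b else mx0) = max mx0 b := by omega
      rw [h1, h2, ih]

-- The accumulator is ignored by A's loop body, so the fold returns the face of the last element.
theorem foldl_face_last (inv : Int) :
    ∀ (t : List Int) (a : Int) (init : String),
      (a :: t).foldl (fun _f num => if num = inv then ":)" else ":(") init
        = if (a :: t).getLast (by simp) = inv then ":)" else ":(" := by
  intro t
  induction t with
  | nil => intro a init; simp [List.foldl]
  | cons b t' ih =>
      intro a init
      show (b :: t').foldl _ (if a = inv then ":)" else ":(") = _
      rw [ih b]
      simp [List.getLast]

-- ===== VERDICT (by name: the statement is the Claim_ definition above) =====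
theorem face_spec : Claim_equal_face := by
  intro l _hdom hpre
  unfold Spec_face face face_alt
  cases l with
  | nil => exact absurd rfl hpre
  | cons a t =>
      rw [PySem.List.max?_id_cons, PySem.List.min?_id_cons]
      simp only [triple_fold_eq]
      rw [foldl_face_last]
      have hl : (a :: t).getLast (by simp) = t.getLastD a := by
        cases t with
        | nil => simp [List.getLast]
        | cons b t' =>
          rw [List.getLastD_eq_getLast?,
              List.getLast?_eq_some_getLast (l := b :: t') (by simp)]
          simp [List.getLast]
      rw [hl]
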